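-- pv_equiv track=rewrite | github.com/wyk18703232953/myResearch | codeComplex/data/filteredData/python/np/python_np_0303.py | solve
-- ===== SOURCE A (Python) =====
-- MOD = 998244353
--
-- def solve(n, k):
--     if k > 2 * n:
--         return 0
--     if k == 2 * n or k == 1:
--         return 2
--
--     iguales = [0] * (k + 1)
--     diferentes = [0] * (k + 1)
--
--     iguales[1] = 2
--     diferentes[2] = 2
--
--     for _ in range(1, n):
--         auxigual = [0] * (k + 1)
--         auxdiff = [0] * (k + 1)
--
--         for j in range(1, k + 1):
--             auxigual[j] = (iguales[j] + iguales[j - 1] + 2 * diferentes[j]) % MOD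
--
--         for j in range(2, k + 1):
--             auxdiff[j] = (diferentes[j] + diferentes[j - 2] + 2 * iguales[j - 1]) % MOD
--
--         iguales = auxigual
--         diferentes = auxdiff
--
--     return (iguales[-1] + diferentes[-1]) % MOD
-- ===== SOURCE B (Python) =====
-- MOD = 998244353
--
-- def solve(n, k):
--     if k > 2 * n:
--         return 0
--     if k == 2 * n or k == 1:
--         return 2
--
--     # Generating-function view: with I_t(x) = sum_j iguales_t[j] x^j and
--     # D_t(x) likewise, one DP step is multiplication by the transfer matrix
--     # T = [[1+x, 2], [2x, 1+x^2]] over polynomials mod x^(k+1).  So the answer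
--     # is coefficient k of T^(n-1) applied to (2x, 2x^2), and T^(n-1) is
--     # computed by binary exponentiation (log n polynomial matrix products).
--     K = k + 1
--
--     def pmul(p, q):
--         return [sum(p[t] * q[j - t] for t in range(j + 1)) % MOD for j in range(K)]
--
--     def padd(p, q):
--         return [(p[j] + q[j]) % MOD for j in range(K)]
--
--     zero = [0] * K
--     one = [1] + [0] * (K - 1)
--     ma = [1, 1] + [0] * (K - 2)        # 1 + x
--     mb = [2] + [0] * (K - 1)           # 2
--     mc = [0, 2] + [0] * (K - 2)        # 2x
--     md = [1, 0, 1] + [0] * (K - 3)     # 1 + x^2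
--
--     ra, rb, rc, rd = one, zero, zero, one
--     e = n - 1
--     while e > 0:
--         if e & 1:
--             ra, rb, rc, rd = (padd(pmul(ra, ma), pmul(rb, mc)),
--                               padd(pmul(ra, mb), pmul(rb, md)),
--                               padd(pmul(rc, ma), pmul(rd, mc)),
--                               padd(pmul(rc, mb), pmul(rd, md)))
--         ma, mb, mc, md = (padd(pmul(ma, ma), pmul(mb, mc)),
--                           padd(pmul(ma, mb), pmul(mb, md)),
--                           padd(pmul(mc, ma), pmul(md, mc)),
--                           padd(pmul(mc, mb), pmul(md, md)))
--         e >>= 1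
--
--     v0 = [0, 2] + [0] * (K - 2)        # I_1 = 2x
--     v1 = [0, 0, 2] + [0] * (K - 3)     # D_1 = 2x^2
--     I = padd(pmul(ra, v0), pmul(rb, v1))
--     D = padd(pmul(rc, v0), pmul(rd, v1))
--     return (I[k] + D[k]) % MOD
-- ===== Notes on version B (the rewrite author's own statement) =====
-- stated objective: alternative
-- what changed: B reformulates the DP through generating functions: one step is multiplication by the 2x2 transfer matrix [[1+x,2],[2x,1+x^2]] over polynomials truncated at degree k, so B raises that matrix to the power n-1 by binary exponentiation and applies it to the initial pair (2x,2x^2), reading off coefficient k; it trades the n-step sweep for log n polynomial matrix products.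
import Mathlib
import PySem

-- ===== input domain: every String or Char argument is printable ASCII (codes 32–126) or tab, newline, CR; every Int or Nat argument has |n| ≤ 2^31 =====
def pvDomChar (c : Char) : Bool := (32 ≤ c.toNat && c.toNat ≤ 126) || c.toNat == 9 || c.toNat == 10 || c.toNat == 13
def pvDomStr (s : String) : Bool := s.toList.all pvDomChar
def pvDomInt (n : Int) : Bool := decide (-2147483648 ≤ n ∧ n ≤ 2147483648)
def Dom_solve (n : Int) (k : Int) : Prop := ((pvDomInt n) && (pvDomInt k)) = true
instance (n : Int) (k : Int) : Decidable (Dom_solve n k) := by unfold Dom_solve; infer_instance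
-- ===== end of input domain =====

-- B replaces A's n-step array DP by binary exponentiation of the 2x2 polynomial
-- transfer matrix [[1+x,2],[2x,1+x^2]] mod x^(k+1); objective: alternative, no speed claim.

-- ===== PORT A =====
def pvMOD : Int := 998244353

-- body of A's outer loop: 'auxigual = [0]*(k+1); for j in range(1,k+1): auxigual[j] = …'
-- ported as a map over the index range with the untouched entry j = 0 left at 0 (exact)
def aStep (K : Nat) (st : List Int × List Int) : List Int × List Int :=
  ((List.range K).map (fun j =>
      if 1 ≤ j then (st.1.getD j 0 + st.1.getD (j-1) 0 + 2 * st.2.getD j 0) % pvMOD else 0),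
   (List.range K).map (fun j =>
      if 2 ≤ j then (st.2.getD j 0 + st.2.getD (j-2) 0 + 2 * st.1.getD (j-1) 0) % pvMOD else 0))

def solve (n : Int) (k : Int) : Int :=
  if k > 2*n then 0
  else if k = 2*n ∨ k = 1 then 2
  else
    let K := (k+1).toNat
    let st := (PySem.List.pyRange 1 n 1).foldl (fun st _ => aStep K st)
      ((List.replicate K 0).set 1 2, (List.replicate K 0).set 2 2)
    -- 'iguales[-1] + diferentes[-1]': the lists are nonempty under Pre_solve
    (st.1.getLastD 0 + st.2.getLastD 0) % pvMOD

-- ===== PORT B =====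
-- Source B's pmul: truncated polynomial product mod x^K and MOD
def pmulB (K : Nat) (p q : List Int) : List Int :=
  (List.range K).map (fun j =>
    (((List.range (j+1)).map (fun t => p.getD t 0 * q.getD (j-t) 0)).sum) % pvMOD)

-- Source B's padd
def paddB (K : Nat) (p q : List Int) : List Int :=
  (List.range K).map (fun j => (p.getD j 0 + q.getD j 0) % pvMOD)

-- one 2x2 matrix product of polynomial entries (a, b, c, d), as in Source B's update tuples
def qmulB (K : Nat) (X Y : List Int × List Int × List Int × List Int) :
    List Int × List Int × List Int × List Int :=
  (paddB K (pmulB K X.1 Y.1) (pmulB K X.2.1 Y.2.2.1),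
   paddB K (pmulB K X.1 Y.2.1) (pmulB K X.2.1 Y.2.2.2),
   paddB K (pmulB K X.2.2.1 Y.1) (pmulB K X.2.2.2 Y.2.2.1),
   paddB K (pmulB K X.2.2.1 Y.2.1) (pmulB K X.2.2.2 Y.2.2.2))

-- Source B's 'while e > 0' binary-exponentiation loop on (R, M)
def powLoopB (K : Nat) (e : Nat) (Rq Mq : List Int × List Int × List Int × List Int) :
    List Int × List Int × List Int × List Int :=
  if h : e = 0 then Rq
  else powLoopB K (e / 2) (if e % 2 = 1 then qmulB K Rq Mq else Rq) (qmulB K Mq Mq)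
  termination_by e
  decreasing_by exact Nat.div_lt_self (Nat.pos_of_ne_zero h) one_lt_two

def solve_alt (n : Int) (k : Int) : Int :=
  if k > 2*n then 0
  else if k = 2*n ∨ k = 1 then 2
  else
    let K := (k+1).toNat
    let zero : List Int := List.replicate K 0
    let one : List Int := [1] ++ List.replicate (K-1) 0
    let ma : List Int := [1, 1] ++ List.replicate (K-2) 0      -- 1 + x
    let mb : List Int := [2] ++ List.replicate (K-1) 0          -- 2
    let mc : List Int := [0, 2] ++ List.replicate (K-2) 0       -- 2x
    let md : List Int := [1, 0, 1] ++ List.replicate (K-3) 0    -- 1 + x^2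
    let st := powLoopB K (n-1).toNat (one, zero, zero, one) (ma, mb, mc, md)
    let v0 : List Int := [0, 2] ++ List.replicate (K-2) 0       -- I_1 = 2x
    let v1 : List Int := [0, 0, 2] ++ List.replicate (K-3) 0    -- D_1 = 2x^2
    let I := paddB K (pmulB K st.1 v0) (pmulB K st.2.1 v1)
    let D := paddB K (pmulB K st.2.2.1 v0) (pmulB K st.2.2.2 v1)
    (I.getD k.toNat 0 + D.getD k.toNat 0) % pvMOD

-- ===== PRECONDITION & SPEC =====
-- Pre_ excludes exactly the inputs where A raises IndexError: k ≤ 0 while the guards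
-- fall through to the DP (k < 2n), where 'iguales[1] = 2' indexes a list of length ≤ 1.
def Pre_solve (n : Int) (k : Int) : Prop := k > 2*n ∨ k = 2*n ∨ k = 1 ∨ 2 ≤ k
instance (n : Int) (k : Int) : Decidable (Pre_solve n k) := by unfold Pre_solve; infer_instance

def pvWitness_solve : Int × Int := (3, 4)

def Spec_solve (n : Int) (k : Int) (out : Int) : Prop := out = solve_alt n k
instance (n : Int) (k : Int) (out : Int) : Decidable (Spec_solve n k out) := by unfold Spec_solve; infer_instance

-- ===== CLAIM (what is proved, stated in full; the proofs are below) =====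
def Claim_equal_solve : Prop := ∀ (n : Int) (k : Int), Dom_solve n k → Pre_solve n k → Spec_solve n k (solve n k)

-- ===== LEMMAS AND PROOFS =====

-- the pure DP recurrence: (F s).1/.2 are A's rows 'iguales'/'diferentes' after s update steps
def F : Nat → (Nat → Int) × (Nat → Int)
  | 0 => (fun j => if j = 1 then 2 else 0, fun j => if j = 2 then 2 else 0)
  | s+1 =>
    (fun j => if j = 0 then 0 else ((F s).1 j + (F s).1 (j-1) + 2 * (F s).2 j) % pvMOD,
     fun j => if j < 2 then 0 else ((F s).2 j + (F s).2 (j-2) + 2 * (F s).1 (j-1)) % pvMOD)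

def FI (s j : Nat) : Int := (F s).1 j
def FD (s j : Nat) : Int := (F s).2 j

def rowI (K s : Nat) : List Int := (List.range K).map (fun j => FI s j)
def rowD (K s : Nat) : List Int := (List.range K).map (fun j => FD s j)

theorem FI_zero (s : Nat) : FI s 0 = 0 := by cases s <;> simp [FI, F]
theorem FD_zero (s : Nat) : FD s 0 = 0 := by cases s <;> simp [FD, F]
theorem FD_one (s : Nat) : FD s 1 = 0 := by cases s <;> simp [FD, F]

theorem getD_map_range' (f : Nat → Int) (U i : Nat) (h : i < U) :
    (((List.range U).map f).getD i 0) = f i := by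
  rw [List.getD_eq_getElem?_getD]
  simp [h]

theorem foldl_const_step {α σ : Type} (f : σ → σ) :
    ∀ (l : List α) (i : σ), l.foldl (fun s _ => f s) i = f^[l.length] i := by
  intro l
  induction l with
  | nil => intro i; simp
  | cons x t ih => intro i; simp [ih, Function.iterate_succ_apply]

-- ===== A-side =====
theorem aStep_row (K s : Nat) : aStep K (rowI K s, rowD K s) = (rowI K (s+1), rowD K (s+1)) := by
  unfold aStep
  refine Prod.ext ?_ ?_
  · show _ = rowI K (s+1)
    unfold rowI rowD
    refine List.map_congr_left ?_
    intro j hj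
    rw [List.mem_range] at hj
    rw [getD_map_range' _ _ _ hj, getD_map_range' _ _ _ (by omega : j - 1 < K),
        getD_map_range' _ _ _ hj]
    by_cases h1 : 1 ≤ j
    · simp only [if_pos h1]
      simp [FI, FD, F, show j ≠ 0 by omega]
    · simp only [if_neg h1]
      have : j = 0 := by omega
      subst this
      simp [FI, F]
  · show _ = rowD K (s+1)
    unfold rowI rowD
    refine List.map_congr_left ?_
    intro j hj
    rw [List.mem_range] at hj
    rw [getD_map_range' _ _ _ hj, getD_map_range' _ _ _ (by omega : j - 2 < K),
        getD_map_range' _ _ _ (by omega : j - 1 < K)]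
    by_cases h2 : 2 ≤ j
    · simp only [if_pos h2, FI, FD, F]
      rw [if_neg (by omega : ¬ j < 2)]
    · simp only [if_neg h2, FD, F]
      rw [if_pos (by omega : j < 2)]

theorem aIter (K m s : Nat) :
    (fun st => aStep K st)^[m] (rowI K s, rowD K s) = (rowI K (s+m), rowD K (s+m)) := by
  induction m generalizing s with
  | zero => simp
  | succ m ih =>
    rw [Function.iterate_succ_apply]
    show (fun st => aStep K st)^[m] (aStep K (rowI K s, rowD K s)) = _
    rw [aStep_row, ih]
    congr 2 <;> omega

theorem init_rowI (K : Nat) : (List.replicate K (0:Int)).set 1 2 = rowI K 0 := by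
  apply List.ext_getElem
  · simp [rowI]
  · intro i h1 h2
    simp only [rowI, List.getElem_map, List.getElem_range]
    rcases eq_or_ne i 1 with rfl | hne
    · rw [List.getElem_set_self (by simp [rowI] at h2; omega)]
      simp [FI, F]
    · rw [List.getElem_set_ne (by omega)]
      simp [FI, F, hne]

theorem init_rowD (K : Nat) : (List.replicate K (0:Int)).set 2 2 = rowD K 0 := by
  apply List.ext_getElem
  · simp [rowD]
  · intro i h1 h2
    simp only [rowD, List.getElem_map, List.getElem_range]
    rcases eq_or_ne i 2 with rfl | hne
    · rw [List.getElem_set_self (by simp [rowD] at h2; omega)]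
      simp [FD, F]
    · rw [List.getElem_set_ne (by omega)]
      simp [FD, F, hne]

theorem getLastD_map_range (f : Nat → Int) (U : Nat) (hU : 1 ≤ U) :
    ((List.range U).map f).getLastD 0 = f (U-1) := by
  rw [List.getLastD_eq_getLast?, List.getLast?_eq_getElem?]
  simp [show U - 1 < U by omega]

-- ===== B-side: power series semantics =====

-- cast of Python's '% MOD' into ZMod
theorem cast_emod (a : Int) : ((a % pvMOD : Int) : ZMod 998244353) = (a : ZMod 998244353) := by
  apply (ZMod.intCast_eq_intCast_iff' (a % pvMOD) a 998244353).mpr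
  unfold pvMOD
  push_cast
  simp [Int.emod_emod_of_dvd]

theorem cast_sum_range (g : Nat → Int) (m : Nat) :
    ((((List.range m).map g).sum : Int) : ZMod 998244353)
      = ∑ t ∈ Finset.range m, ((g t : Int) : ZMod 998244353) := by
  induction m with
  | zero => simp
  | succ m ih => simp [List.range_succ, Finset.sum_range_succ, ih]

-- a list represents the first K coefficients of a power series
def RepP (K : Nat) (p : List Int) (f : PowerSeries (ZMod 998244353)) : Prop :=
  ∀ j, j < K → ((p.getD j 0 : Int) : ZMod 998244353) = PowerSeries.coeff j f

theorem pmulB_rep {K : Nat} {p q : List Int} {f g : PowerSeries (ZMod 998244353)}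
    (hp : RepP K p f) (hq : RepP K q g) : RepP K (pmulB K p q) (f * g) := by
  intro j hj
  unfold pmulB
  rw [getD_map_range' _ _ _ hj, cast_emod, cast_sum_range]
  rw [PowerSeries.coeff_mul, Finset.Nat.sum_antidiagonal_eq_sum_range_succ_mk]
  refine Finset.sum_congr rfl ?_
  intro t ht
  rw [Finset.mem_range] at ht
  push_cast
  rw [hp t (by omega), hq (j - t) (by omega)]

theorem paddB_rep {K : Nat} {p q : List Int} {f g : PowerSeries (ZMod 998244353)}
    (hp : RepP K p f) (hq : RepP K q g) : RepP K (paddB K p q) (f + g) := by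
  intro j hj
  unfold paddB
  rw [getD_map_range' _ _ _ hj, cast_emod]
  push_cast
  rw [hp j hj, hq j hj, map_add]

-- a quadruple represents a 2x2 matrix of power series
def RepMP (K : Nat) (q : List Int × List Int × List Int × List Int)
    (A : Matrix (Fin 2) (Fin 2) (PowerSeries (ZMod 998244353))) : Prop :=
  RepP K q.1 (A 0 0) ∧ RepP K q.2.1 (A 0 1) ∧ RepP K q.2.2.1 (A 1 0) ∧ RepP K q.2.2.2 (A 1 1)

theorem mul_entry {A B : Matrix (Fin 2) (Fin 2) (PowerSeries (ZMod 998244353))} (i j : Fin 2) :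
    (A * B) i j = A i 0 * B 0 j + A i 1 * B 1 j := by
  rw [Matrix.mul_apply, Fin.sum_univ_two]

theorem qmulB_rep {K : Nat} {X Y : List Int × List Int × List Int × List Int}
    {A B : Matrix (Fin 2) (Fin 2) (PowerSeries (ZMod 998244353))}
    (hX : RepMP K X A) (hY : RepMP K Y B) : RepMP K (qmulB K X Y) (A * B) := by
  obtain ⟨ha, hb, hc, hd⟩ := hX
  obtain ⟨ha', hb', hc', hd'⟩ := hY
  refine ⟨?_, ?_, ?_, ?_⟩ <;> rw [mul_entry] <;>
    exact paddB_rep (pmulB_rep (by assumption) (by assumption))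
      (pmulB_rep (by assumption) (by assumption))

theorem powLoopB_rep {K : Nat} (e : Nat) :
    ∀ (Rq Mq : List Int × List Int × List Int × List Int)
      (A B : Matrix (Fin 2) (Fin 2) (PowerSeries (ZMod 998244353))),
      RepMP K Rq A → RepMP K Mq B → RepMP K (powLoopB K e Rq Mq) (A * B ^ e) := by
  induction e using Nat.strong_induction_on with
  | _ e ih =>
    intro Rq Mq A B hR hM
    rw [powLoopB]
    by_cases h : e = 0
    · subst h; simpa using hR
    · rw [dif_neg h]
      have hrec := ih (e / 2) (Nat.div_lt_self (Nat.pos_of_ne_zero h) one_lt_two)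
        (if e % 2 = 1 then qmulB K Rq Mq else Rq) (qmulB K Mq Mq)
        (if e % 2 = 1 then A * B else A) (B * B)
        (by by_cases hb : e % 2 = 1
            · rw [if_pos hb, if_pos hb]; exact qmulB_rep hR hM
            · rw [if_neg hb, if_neg hb]; exact hR)
        (qmulB_rep hM hM)
      have halg : (if e % 2 = 1 then A * B else A) * (B * B) ^ (e / 2) = A * B ^ e := by
        have hBB : (B * B) ^ (e / 2) = B ^ (2 * (e / 2)) := by
          rw [pow_mul, sq]
        by_cases hb : e % 2 = 1
        · rw [if_pos hb, hBB, mul_assoc]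
          congr 1
          rw [← pow_succ']
          congr 1
          omega
        · rw [if_neg hb, hBB]
          congr 1
          congr 1
          omega
      rwa [halg] at hrec

-- the transfer matrix  [[1+x, 2], [2x, 1+x^2]]
noncomputable def Tm : Matrix (Fin 2) (Fin 2) (PowerSeries (ZMod 998244353)) :=
  Matrix.of ![![1 + PowerSeries.X, 2], ![2 * PowerSeries.X, 1 + PowerSeries.X ^ 2]]

theorem Tm00 : Tm 0 0 = 1 + PowerSeries.X := rfl
theorem Tm01 : Tm 0 1 = 2 := rfl
theorem Tm10 : Tm 1 0 = 2 * PowerSeries.X := rfl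
theorem Tm11 : Tm 1 1 = 1 + PowerSeries.X ^ 2 := rfl

-- the exact (untruncated) generating functions of A's two DP rows
noncomputable def IDs : Nat → PowerSeries (ZMod 998244353) × PowerSeries (ZMod 998244353)
  | 0 => (2 * PowerSeries.X, 2 * PowerSeries.X ^ 2)
  | s+1 =>
    ((1 + PowerSeries.X) * (IDs s).1 + 2 * (IDs s).2,
     2 * PowerSeries.X * (IDs s).1 + (1 + PowerSeries.X ^ 2) * (IDs s).2)

theorem coeff_X_mul' (j : Nat) (p : PowerSeries (ZMod 998244353)) :
    PowerSeries.coeff j (PowerSeries.X * p)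
      = if j = 0 then 0 else PowerSeries.coeff (j-1) p := by
  cases j with
  | zero => simp [PowerSeries.coeff_zero_X_mul]
  | succ m => simp [PowerSeries.coeff_succ_X_mul]

theorem coeff_X2_mul' (j : Nat) (p : PowerSeries (ZMod 998244353)) :
    PowerSeries.coeff j (PowerSeries.X ^ 2 * p)
      = if j < 2 then 0 else PowerSeries.coeff (j-2) p := by
  have h2 : (PowerSeries.X ^ 2 : PowerSeries (ZMod 998244353)) * p
      = PowerSeries.X * (PowerSeries.X * p) := by ring
  rw [h2]
  match j with
  | 0 => simp [PowerSeries.coeff_zero_X_mul]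
  | 1 => simp [PowerSeries.coeff_succ_X_mul, PowerSeries.coeff_zero_X_mul]
  | m+2 => simp [PowerSeries.coeff_succ_X_mul]

theorem coeff_two_mul (j : Nat) (p : PowerSeries (ZMod 998244353)) :
    PowerSeries.coeff j (2 * p) = 2 * PowerSeries.coeff j p := by
  rw [two_mul, map_add, two_mul]

-- coefficients of the exact series are the casts of A's (reduced) DP values
theorem coeff_IDs (s : Nat) (j : Nat) :
    PowerSeries.coeff j (IDs s).1 = ((FI s j : Int) : ZMod 998244353)
    ∧ PowerSeries.coeff j (IDs s).2 = ((FD s j : Int) : ZMod 998244353) := by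
  induction s generalizing j with
  | zero =>
    constructor
    · show PowerSeries.coeff j (2 * PowerSeries.X) = _
      rw [coeff_two_mul, PowerSeries.coeff_X]
      simp only [FI, F]
      split_ifs <;> simp
    · show PowerSeries.coeff j (2 * PowerSeries.X ^ 2) = _
      rw [coeff_two_mul, PowerSeries.coeff_X_pow]
      simp only [FD, F]
      split_ifs <;> simp
  | succ s ih =>
    constructor
    · show PowerSeries.coeff j ((1 + PowerSeries.X) * (IDs s).1 + 2 * (IDs s).2) = _
      rw [map_add, coeff_two_mul, add_mul, one_mul, map_add, coeff_X_mul']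
      rw [(ih j).1, (ih j).2]
      by_cases hj : j = 0
      · subst hj
        have h1 : FI s 0 = 0 := FI_zero s
        have h2 : FD s 0 = 0 := FD_zero s
        have h3 : FI (s+1) 0 = 0 := FI_zero (s+1)
        rw [h1, h2, h3]; simp
      · rw [if_neg hj, (ih (j-1)).1]
        have : FI (s+1) j = (FI s j + FI s (j-1) + 2 * FD s j) % pvMOD := by
          simp only [FI, FD, F]
          rw [if_neg hj]
        rw [this, cast_emod]
        push_cast
        ring
    · show PowerSeries.coeff j (2 * PowerSeries.X * (IDs s).1 + (1 + PowerSeries.X ^ 2) * (IDs s).2) = _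
      have h2x : (2 * PowerSeries.X : PowerSeries (ZMod 998244353)) * (IDs s).1
          = 2 * (PowerSeries.X * (IDs s).1) := by ring
      rw [h2x, map_add, coeff_two_mul, coeff_X_mul', add_mul, one_mul, map_add, coeff_X2_mul']
      rw [(ih j).2]
      by_cases hj : j < 2
      · have hD1 : FD (s+1) j = 0 := by
          simp only [FD, F]; rw [if_pos hj]
        rw [hD1, if_pos hj]
        interval_cases j
        · rw [if_pos rfl, FD_zero]; simp
        · rw [if_neg (by omega), (ih 0).1, FI_zero, FD_one]; simp
      · rw [if_neg (by omega : ¬ j = 0), if_neg hj, (ih (j-1)).1, (ih (j-2)).2]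
        have : FD (s+1) j = (FD s j + FD s (j-2) + 2 * FI s (j-1)) % pvMOD := by
          simp only [FI, FD, F]
          rw [if_neg (by omega : ¬ j < 2)]
        rw [this, cast_emod]
        push_cast
        ring

-- the series pair equals the transfer-matrix power applied to (2x, 2x^2)
theorem IDs_eq_pow (s : Nat) :
    (IDs s).1 = (Tm ^ s) 0 0 * (2 * PowerSeries.X) + (Tm ^ s) 0 1 * (2 * PowerSeries.X ^ 2)
    ∧ (IDs s).2 = (Tm ^ s) 1 0 * (2 * PowerSeries.X) + (Tm ^ s) 1 1 * (2 * PowerSeries.X ^ 2) := by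
  induction s with
  | zero =>
    rw [pow_zero]
    constructor <;> simp [IDs]
  | succ s ih =>
    have hpow : Tm ^ (s+1) = Tm * Tm ^ s := by rw [pow_succ']
    rw [hpow]
    constructor
    · show (1 + PowerSeries.X) * (IDs s).1 + 2 * (IDs s).2 = _
      rw [ih.1, ih.2, mul_entry 0 0, mul_entry 0 1, Tm00, Tm01]
      ring
    · show 2 * PowerSeries.X * (IDs s).1 + (1 + PowerSeries.X ^ 2) * (IDs s).2 = _
      rw [ih.1, ih.2, mul_entry 1 0, mul_entry 1 1, Tm10, Tm11]
      ring

-- getD of a list padded with zeros: the padding is invisible (default is 0 too)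
theorem getD_pad (pre : List Int) (m j : Nat) :
    (pre ++ List.replicate m (0:Int)).getD j 0 = pre.getD j 0 := by
  rw [List.getD_eq_getElem?_getD, List.getD_eq_getElem?_getD, List.getElem?_append]
  by_cases h : j < pre.length
  · rw [if_pos h]
  · rw [if_neg h]
    rw [List.getElem?_eq_none (by omega : pre.length ≤ j)]
    rw [List.getElem?_replicate]
    split_ifs <;> rfl

-- representations of the literal polynomials in solve_alt
theorem rep_zero (K : Nat) : RepP K (List.replicate K (0:Int)) 0 := by
  intro j hj
  rw [List.getD_eq_getElem?_getD, List.getElem?_replicate, if_pos hj]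
  simp

theorem rep_one (K : Nat) : RepP K ([1] ++ List.replicate (K-1) (0:Int)) 1 := by
  intro j hj
  rw [getD_pad, PowerSeries.coeff_one]
  match j with
  | 0 => simp
  | m+1 => simp

theorem rep_ma (K : Nat) :
    RepP K ([1, 1] ++ List.replicate (K-2) (0:Int)) (1 + PowerSeries.X) := by
  intro j hj
  rw [getD_pad, map_add, PowerSeries.coeff_one, PowerSeries.coeff_X]
  match j with
  | 0 => simp
  | 1 => simp
  | m+2 => simp

theorem rep_mb (K : Nat) : RepP K ([2] ++ List.replicate (K-1) (0:Int)) 2 := by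
  intro j hj
  rw [getD_pad]
  have h2 : (2 : PowerSeries (ZMod 998244353)) = 2 * 1 := (mul_one 2).symm
  rw [h2, coeff_two_mul, PowerSeries.coeff_one]
  match j with
  | 0 => simp
  | m+1 => simp

theorem rep_mc (K : Nat) :
    RepP K ([0, 2] ++ List.replicate (K-2) (0:Int)) (2 * PowerSeries.X) := by
  intro j hj
  rw [getD_pad, coeff_two_mul, PowerSeries.coeff_X]
  match j with
  | 0 => simp
  | 1 => simp
  | m+2 => simp

theorem rep_md (K : Nat) :
    RepP K ([1, 0, 1] ++ List.replicate (K-3) (0:Int)) (1 + PowerSeries.X ^ 2) := by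
  intro j hj
  rw [getD_pad, map_add, PowerSeries.coeff_one, PowerSeries.coeff_X_pow]
  match j with
  | 0 => simp
  | 1 => simp
  | 2 => simp
  | m+3 => simp

theorem rep_v1 (K : Nat) :
    RepP K ([0, 0, 2] ++ List.replicate (K-3) (0:Int)) (2 * PowerSeries.X ^ 2) := by
  intro j hj
  rw [getD_pad, coeff_two_mul, PowerSeries.coeff_X_pow]
  match j with
  | 0 => simp
  | 1 => simp
  | 2 => simp
  | m+3 => simp

-- ===== VERDICT (by name: the statement is the Claim_ definition above) =====
theorem solve_spec : Claim_equal_solve := by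
  intro n k hdom hpre
  unfold Spec_solve solve solve_alt
  by_cases hg1 : k > 2*n
  · simp [hg1]
  by_cases hg2 : k = 2*n ∨ k = 1
  · simp [hg1, hg2]
  simp only [if_neg hg1, if_neg hg2]
  have hk2 : 2 ≤ k := by
    unfold Pre_solve at hpre
    rcases hpre with h | h | h | h
    · exact absurd h hg1
    · exact absurd (Or.inl h) hg2
    · exact absurd (Or.inr h) hg2
    · exact h
  have hkn : k < 2*n := by omega
  have hn2 : 2 ≤ n := by omega
  set N := n.toNat with hNdef
  set Kp := k.toNat with hKdef
  have hn : n = (N:Int) := by omega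
  have hk : k = (Kp:Int) := by omega
  have hN2 : 2 ≤ N := by omega
  have hKp2 : 2 ≤ Kp := by omega
  -- A side: reduce to FI/FD
  have hKnat : (k+1).toNat = Kp + 1 := by omega
  have hA : ((List.replicate ((k+1).toNat) (0:Int)).set 1 2, (List.replicate ((k+1).toNat) (0:Int)).set 2 2)
      = (rowI (Kp+1) 0, rowD (Kp+1) 0) := by
    rw [hKnat, init_rowI _, init_rowD _]
  rw [hA]
  rw [foldl_const_step (aStep ((k+1).toNat))]
  rw [PySem.List.length_pyRange_one]
  rw [hKnat]
  have hlen : (n - 1).toNat = N - 1 := by omega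
  rw [hlen]
  rw [aIter]
  simp only [Nat.zero_add]
  unfold rowI rowD
  rw [getLastD_map_range _ _ (by omega), getLastD_map_range _ _ (by omega)]
  -- B side: reduce to coefficients of IDs (N-1)
  simp only [Nat.add_sub_cancel]
  set K := Kp + 1 with hKK
  set q1 := ([1] ++ List.replicate Kp (0:Int), List.replicate K (0:Int),
      List.replicate K (0:Int), [1] ++ List.replicate Kp (0:Int)) with hq1
  set q2 := ([1, 1] ++ List.replicate (K-2) (0:Int), [2] ++ List.replicate Kp (0:Int),
      [0, 2] ++ List.replicate (K-2) (0:Int), [1, 0, 1] ++ List.replicate (K-3) (0:Int)) with hq2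
  set st := powLoopB K (N-1) q1 q2 with hstdef
  have hid : RepMP K q1 (1 : Matrix (Fin 2) (Fin 2) (PowerSeries (ZMod 998244353))) := by
    rw [hq1, show Kp = K - 1 by omega]
    refine ⟨?_, ?_, ?_, ?_⟩
    · rw [show (1 : Matrix (Fin 2) (Fin 2) (PowerSeries (ZMod 998244353))) 0 0 = 1 by
        rw [Matrix.one_apply]; simp]
      exact rep_one K
    · rw [show (1 : Matrix (Fin 2) (Fin 2) (PowerSeries (ZMod 998244353))) 0 1 = 0 by
        rw [Matrix.one_apply]; simp]
      exact rep_zero K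
    · rw [show (1 : Matrix (Fin 2) (Fin 2) (PowerSeries (ZMod 998244353))) 1 0 = 0 by
        rw [Matrix.one_apply]; simp]
      exact rep_zero K
    · rw [show (1 : Matrix (Fin 2) (Fin 2) (PowerSeries (ZMod 998244353))) 1 1 = 1 by
        rw [Matrix.one_apply]; simp]
      exact rep_one K
  have hTm : RepMP K q2 Tm := by
    rw [hq2, show Kp = K - 1 by omega]
    exact ⟨rep_ma K, rep_mb K, rep_mc K, rep_md K⟩
  have hst := powLoopB_rep (K := K) (N-1) q1 q2 1 Tm hid hTm
  rw [one_mul, ← hstdef] at hst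
  obtain ⟨hra, hrb, hrc, hrd⟩ := hst
  have hI : RepP K (paddB K (pmulB K st.1 ([0, 2] ++ List.replicate (K-2) (0:Int)))
      (pmulB K st.2.1 ([0, 0, 2] ++ List.replicate (K-3) (0:Int)))) (IDs (N-1)).1 := by
    rw [(IDs_eq_pow (N-1)).1]
    exact paddB_rep (pmulB_rep hra (rep_mc K)) (pmulB_rep hrb (rep_v1 K))
  have hD : RepP K (paddB K (pmulB K st.2.2.1 ([0, 2] ++ List.replicate (K-2) (0:Int)))
      (pmulB K st.2.2.2 ([0, 0, 2] ++ List.replicate (K-3) (0:Int)))) (IDs (N-1)).2 := by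
    rw [(IDs_eq_pow (N-1)).2]
    exact paddB_rep (pmulB_rep hrc (rep_mc K)) (pmulB_rep hrd (rep_v1 K))
  -- finish: both sides are emod-reductions of integers with equal casts
  have hKpK : Kp < K := by omega
  have hcI := hI Kp hKpK
  have hcD := hD Kp hKpK
  have hFI := (coeff_IDs (N-1) Kp).1
  have hFD := (coeff_IDs (N-1) Kp).2
  rw [hFI] at hcI
  rw [hFD] at hcD
  have hcast : ((FI (N-1) Kp + FD (N-1) Kp : Int) : ZMod 998244353)
      = (((paddB K (pmulB K st.1 ([0, 2] ++ List.replicate (K-2) (0:Int)))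
            (pmulB K st.2.1 ([0, 0, 2] ++ List.replicate (K-3) (0:Int)))).getD Kp 0
          + (paddB K (pmulB K st.2.2.1 ([0, 2] ++ List.replicate (K-2) (0:Int)))
            (pmulB K st.2.2.2 ([0, 0, 2] ++ List.replicate (K-3) (0:Int)))).getD Kp 0 : Int)
          : ZMod 998244353) := by
    push_cast
    rw [← hcI, ← hcD]
  have hmods := (ZMod.intCast_eq_intCast_iff' _ _ 998244353).mp hcast
  unfold pvMOD
  push_cast at hmods ⊢
  exact hmods
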